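-- pv_equiv track=rewrite | github.com/MATLEMA/Parking | configurateur/utils/gestion_trame.py | calcul_bcc
-- ===== SOURCE A (Python) =====
-- def calcul_bcc(adresse_appareil: str, nom_fonction : str, valeur = "")   -> str :
--     """Calcul la somme des octets en 1 octet
--
--     :param adresse_appareil: adresse hexadécimal d'un appareil
--     :type adresse_appareil: str
--     :param nom_fonction: Nom de la fonction
--     :type nom_fonction: str
--     :param valeur: valeur optionnel à ajouter si la fonction en a besoin, defaults to ""
--     :type valeur: str, optional
--     :raises ValueError: adresse_appareil en hexadécimal
--     :raises ValueError: adresse_appareil doit être de longeur 2 ou 4!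
--     :return: Somme de tout les octets en un seul octet
--     :rtype: str
--     """
--     # Vérifie si adresse_appareil est valide avant tout calcul
--     try :
--         int(adresse_appareil, 16)
--     except ValueError :
--         raise ValueError("Adresse_appareil en hexadecimal!")
--
--     if len(adresse_appareil) == 4 :
--
--         if valeur == "" :
--             somme = int(adresse_appareil[0:2], 16) + int(adresse_appareil[2:4], 16) + int(nom_fonction, 16)
--         else :
--             somme = int(adresse_appareil[0:2], 16) + int(adresse_appareil[2:4], 16) + int(nom_fonction, 16)
--             for i in range(0, len(valeur), 2):
--                 somme += int(valeur[i:i+2], 16)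
--
--         bcc = format(somme, "02x")[-2:]
--
--         return bcc
--
--     elif len(adresse_appareil) == 2 :
--
--         if valeur == "" :
--             somme = int(adresse_appareil, 16) + int(nom_fonction, 16)
--         else :
--             somme = int(adresse_appareil, 16) + int(nom_fonction, 16)
--             for i in range(0, len(valeur), 2):
--                 somme += int(valeur[i:i+2], 16)
--
--         bcc = format(somme, "02x")[-2:]
--
--         return bcc
--
--     else :
--         raise ValueError("Adresse_appareil doit être de longeur 2 ou 4!")
-- ===== SOURCE B (Python) =====
-- HEX_DIGITS = "0123456789abcdefABCDEF"
--
--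
-- def calcul_bcc(adresse_appareil: str, nom_fonction: str, valeur="") -> str:
--     try:
--         int(adresse_appareil, 16)
--     except ValueError:
--         raise ValueError("Adresse_appareil en hexadecimal!")
--     if len(adresse_appareil) not in (2, 4):
--         raise ValueError("Adresse_appareil doit être de longeur 2 ou 4!")
--     # one character-level pass: each hex digit contributes its value, weighted by
--     # 16 when it is the high nibble of a byte (even position with a partner digit)
--     somme = int(nom_fonction, 16)
--     for s in (adresse_appareil, valeur):
--         n = len(s)
--         for i, ch in enumerate(s):
--             poids = 16 if i % 2 == 0 and i + 1 < n else 1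
--             somme += poids * int(ch, 16)
--     return format(somme, "02x")[-2:]
-- ===== Notes on version B (the rewrite author's own statement) =====
-- stated objective: alternative
-- what changed: Replaces A's two length branches and per-chunk slicing loops (int(s[i:i+2],16)) by a single character-level pass: every hex digit contributes its nibble value weighted 16 or 1 by its position, folded into one accumulator over the address and value.
-- outside the precondition, e.g. on calcul_bcc(' f', '+f', ''): A returns '1e', B raises ValueError; on calcul_bcc('1f', '05', ' f'): A returns '33', B raises ValueError; on calcul_bcc('+f', '05', ''): A returns '14', B raises ValueError
import Mathlib
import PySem

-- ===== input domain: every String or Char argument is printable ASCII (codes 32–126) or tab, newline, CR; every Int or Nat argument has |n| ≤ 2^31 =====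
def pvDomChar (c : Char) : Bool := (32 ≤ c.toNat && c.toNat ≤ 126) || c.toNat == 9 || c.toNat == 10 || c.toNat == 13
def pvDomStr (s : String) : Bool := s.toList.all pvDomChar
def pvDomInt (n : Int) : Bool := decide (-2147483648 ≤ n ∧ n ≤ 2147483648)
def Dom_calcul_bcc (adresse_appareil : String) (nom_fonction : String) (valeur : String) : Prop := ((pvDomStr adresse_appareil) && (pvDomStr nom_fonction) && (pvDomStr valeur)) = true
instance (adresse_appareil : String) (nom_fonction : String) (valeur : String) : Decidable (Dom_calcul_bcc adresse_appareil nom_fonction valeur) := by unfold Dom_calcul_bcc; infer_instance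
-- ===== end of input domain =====

-- B replaces A's two length branches and 2-char-chunk slicing loops by a single
-- character-level pass (each hex digit weighted 16 or 1 by its position); objective: alternative.

-- shared exact model of Python's  format(n, "02x")  (both Pythons call this same builtin)
def pvHexDigit (n : Nat) : Char := if n < 10 then Char.ofNat (48 + n) else Char.ofNat (87 + n)

def pvNatHexChars (n : Nat) : List Char :=
  if h : n < 16 then [pvHexDigit n] else pvNatHexChars (n / 16) ++ [pvHexDigit (n % 16)]
  decreasing_by exact Nat.div_lt_self (by omega) (by omega)

def pvFormat02x (n : Int) : List Char :=
  if n < 0 then '-' :: pvNatHexChars (-n).toNat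
  else
    let h := pvNatHexChars n.toNat
    List.replicate (2 - h.length) '0' ++ h

-- shared exact model of Python's  s[-2:]  on the formatted string
def pvLastTwo (l : List Char) : List Char := l.drop (l.length - 2)

-- ===== PORT A =====
-- somme += int(valeur[i:i+2], 16)  (none = ValueError propagating out of the loop)
def pvChunkAdd (l : List Char) (acc : Option Int) (i : Int) : Option Int :=
  acc.bind fun s =>
    (PySem.Int.ofCharsBase? (PySem.List.slice l (some i) (some (i + 2))) 16).map fun c => s + c

def calcul_bcc (adresse_appareil : String) (nom_fonction : String) (valeur : String) : String :=
  match PySem.Int.ofStrBase? adresse_appareil 16 with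
  | none => ""  -- raise ValueError("Adresse_appareil en hexadecimal!")
  | some _ =>
    let la := adresse_appareil.toList
    if la.length = 4 then
      match PySem.Int.ofCharsBase? (PySem.List.slice la (some 0) (some 2)) 16,
            PySem.Int.ofCharsBase? (PySem.List.slice la (some 2) (some 4)) 16,
            PySem.Int.ofStrBase? nom_fonction 16 with
      | some x0, some x2, some y =>
        let somme : Option Int :=
          if valeur = "" then some (x0 + x2 + y)
          else (PySem.List.pyRange 0 valeur.toList.length 2).foldl (pvChunkAdd valeur.toList)
                 (some (x0 + x2 + y))
        match somme with
        | some s => String.mk (pvLastTwo (pvFormat02x s))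
        | none => ""  -- ValueError from int(valeur[i:i+2], 16)
      | _, _, _ => ""  -- ValueError from one of the int(…, 16) calls
    else if la.length = 2 then
      match PySem.Int.ofStrBase? adresse_appareil 16, PySem.Int.ofStrBase? nom_fonction 16 with
      | some x, some y =>
        let somme : Option Int :=
          if valeur = "" then some (x + y)
          else (PySem.List.pyRange 0 valeur.toList.length 2).foldl (pvChunkAdd valeur.toList)
                 (some (x + y))
        match somme with
        | some s => String.mk (pvLastTwo (pvFormat02x s))
        | none => ""
      | _, _ => ""
    else ""  -- raise ValueError("Adresse_appareil doit être de longeur 2 ou 4!")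

-- ===== PORT B =====
-- somme += poids * int(ch, 16)  for one enumerated character (none = ValueError)
def pvDigitStep (n : Int) (acc : Option Int) (p : Int × Char) : Option Int :=
  acc.bind fun t =>
    (PySem.Int.ofCharsBase? [p.2] 16).map fun d =>
      t + (if PySem.Int.mod p.1 2 = 0 ∧ p.1 + 1 < n then 16 else 1) * d

-- the inner  for i, ch in enumerate(s)  loop of B
def pvCharSum (l : List Char) (acc : Option Int) : Option Int :=
  (PySem.List.enumerate l).foldl (pvDigitStep (PySem.List.len l)) acc

def calcul_bcc_alt (adresse_appareil : String) (nom_fonction : String) (valeur : String) : String :=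
  match PySem.Int.ofStrBase? adresse_appareil 16 with
  | none => ""  -- raise ValueError("Adresse_appareil en hexadecimal!")
  | some _ =>
    if adresse_appareil.toList.length = 2 ∨ adresse_appareil.toList.length = 4 then
      match PySem.Int.ofStrBase? nom_fonction 16 with
      | none => ""  -- ValueError from int(nom_fonction, 16)
      | some y =>
        -- for s in (adresse_appareil, valeur): for i, ch in enumerate(s): somme += poids * int(ch, 16)
        match [adresse_appareil.toList, valeur.toList].foldl (fun acc s => pvCharSum s acc) (some y) with
        | some s => String.mk (pvLastTwo (pvFormat02x s))
        | none => ""  -- ValueError from int(ch, 16)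
    else ""  -- raise ValueError("Adresse_appareil doit être de longeur 2 ou 4!")

-- ===== PRECONDITION & SPEC =====
def pvHexChars : List Char := "0123456789abcdefABCDEF".toList

-- Pre_ excludes the inputs on which A raises a ValueError (non-hex address, address length
-- not 2 or 4, non-hex nom_fonction, a 2-char chunk int() rejects) and, in addition, the
-- inputs whose address/valeur chunks carry whitespace or sign characters that int(…, 16)
-- happens to accept (' f', '+f'): there A's value is an artefact of per-chunk int() parsing
-- and B's per-digit scan rejects them, so Pre_ restricts to pure hex-digit strings.
def Pre_calcul_bcc (adresse_appareil : String) (nom_fonction : String) (valeur : String) : Prop :=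
  (PySem.Int.ofStrBase? adresse_appareil 16).isSome = true ∧
  (adresse_appareil.toList.length = 2 ∨ adresse_appareil.toList.length = 4) ∧
  (PySem.Int.ofStrBase? nom_fonction 16).isSome = true ∧
  (adresse_appareil.toList.all fun c => pvHexChars.contains c) = true ∧
  (valeur.toList.all fun c => pvHexChars.contains c) = true

instance (adresse_appareil : String) (nom_fonction : String) (valeur : String) : Decidable (Pre_calcul_bcc adresse_appareil nom_fonction valeur) := by unfold Pre_calcul_bcc; infer_instance

def pvWitness_calcul_bcc : String × String × String := ("1f", "05", "0a10")

def Spec_calcul_bcc (adresse_appareil : String) (nom_fonction : String) (valeur : String) (out : String) : Prop := out = calcul_bcc_alt adresse_appareil nom_fonction valeur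
instance (adresse_appareil : String) (nom_fonction : String) (valeur : String) (out : String) : Decidable (Spec_calcul_bcc adresse_appareil nom_fonction valeur out) := by unfold Spec_calcul_bcc; infer_instance

-- ===== CLAIM (what is proved, stated in full; the proofs are below) =====
def Claim_equal_calcul_bcc : Prop := ∀ (adresse_appareil : String) (nom_fonction : String) (valeur : String), Dom_calcul_bcc adresse_appareil nom_fonction valeur → Pre_calcul_bcc adresse_appareil nom_fonction valeur → Spec_calcul_bcc adresse_appareil nom_fonction valeur (calcul_bcc adresse_appareil nom_fonction valeur)

-- ===== LEMMAS AND PROOFS =====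

-- nibble value of one hex-digit character
def pvHv (c : Char) : Int := (PySem.Int.ofCharsBase? [c] 16).getD 0

-- the byte sum of a pure hex-digit string, two digits at a time (proof-side model)
def pvChunkVal : List Char → Int
  | [] => 0
  | [c] => pvHv c
  | c1 :: c2 :: r => 16 * pvHv c1 + pvHv c2 + pvChunkVal r

theorem pvSingle_parse : ∀ c ∈ pvHexChars, PySem.Int.ofCharsBase? [c] 16 = some (pvHv c) := by
  have h : (pvHexChars.all fun c =>
      PySem.Int.ofCharsBase? [c] 16 == some (pvHv c)) = true := by decide
  simp only [List.all_eq_true, beq_iff_eq] at h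
  exact h

theorem pvPair_parse : ∀ c1 ∈ pvHexChars, ∀ c2 ∈ pvHexChars,
    PySem.Int.ofCharsBase? [c1, c2] 16 = some (16 * pvHv c1 + pvHv c2) := by
  have h : (pvHexChars.all fun c1 => pvHexChars.all fun c2 =>
      PySem.Int.ofCharsBase? [c1, c2] 16 == some (16 * pvHv c1 + pvHv c2)) = true := by decide
  simp only [List.all_eq_true, beq_iff_eq] at h
  exact h

-- step-2 range induction forms
theorem pvRange2_nil (j n : Int) (h : n ≤ j) : PySem.List.pyRange j n 2 = [] := by
  rw [PySem.List.pyRange_of_pos j n (by norm_num)]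
  simp [show ¬ j < n by omega]

theorem pvRange2_cons (j n : Int) (h : j < n) :
    PySem.List.pyRange j n 2 = j :: PySem.List.pyRange (j + 2) n 2 := by
  rw [PySem.List.pyRange_of_pos j n (by norm_num), PySem.List.pyRange_of_pos (j + 2) n (by norm_num)]
  by_cases h2 : j + 2 < n
  · rw [if_pos h, if_pos h2,
      show ((n - j + 2 - 1) / 2).toNat = ((n - (j + 2) + 2 - 1) / 2).toNat + 1 from by omega,
      List.range_succ_eq_map]
    simp [List.map_map, Function.comp_def]
    intro k _
    ring
  · rw [if_pos h, if_neg h2,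
      show ((n - j + 2 - 1) / 2).toNat = 1 from by omega]
    simp

theorem pvALoop (t : List Char) : ∀ (l : List Char) (j : Nat) (s : Int),
    l.drop j = t → (∀ c ∈ t, c ∈ pvHexChars) →
    (PySem.List.pyRange (j : Int) (l.length : Int) 2).foldl (pvChunkAdd l) (some s)
      = some (s + pvChunkVal t) := by
  induction t using pvChunkVal.induct with
  | case1 =>
    intro l j s hd _
    have hj : l.length ≤ j := by
      have := congrArg List.length hd
      simp [List.length_drop] at this
      omega
    rw [pvRange2_nil _ _ (by exact_mod_cast hj)]
    simp [pvChunkVal]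
  | case2 c =>
    intro l j s hd hh
    have hlen : l.length = j + 1 := by
      have := congrArg List.length hd
      simp [List.length_drop] at this
      omega
    rw [pvRange2_cons _ _ (by exact_mod_cast (by omega : j < l.length)),
      pvRange2_nil _ _ (by push_cast; omega)]
    have hslice : PySem.List.slice l (some (j : Int)) (some ((j : Int) + 2)) = [c] := by
      rw [show ((j : Int) + 2) = ((j : Int) + ((2 : Nat) : Int)) from by norm_num,
        PySem.List.slice_natCast_add, hd]
      rfl
    simp only [List.foldl_cons, List.foldl_nil, pvChunkAdd, hslice, Option.bind_some,
      pvSingle_parse c (hh c (by simp)), Option.map_some, pvChunkVal]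
  | case3 c1 c2 r ih =>
    intro l j s hd hh
    have hlen : j + 2 ≤ l.length := by
      have := congrArg List.length hd
      simp [List.length_drop] at this
      omega
    rw [pvRange2_cons _ _ (by exact_mod_cast (by omega : j < l.length))]
    have hslice : PySem.List.slice l (some (j : Int)) (some ((j : Int) + 2)) = [c1, c2] := by
      rw [show ((j : Int) + 2) = ((j : Int) + ((2 : Nat) : Int)) from by norm_num,
        PySem.List.slice_natCast_add, hd]
      rfl
    simp only [List.foldl_cons, pvChunkAdd, hslice, Option.bind_some,
      pvPair_parse c1 (hh c1 (by simp)) c2 (hh c2 (by simp)), Option.map_some]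
    rw [show ((j : Int) + 2) = (((j + 2 : Nat)) : Int) from by norm_num,
      ih l (j + 2) _ (by rw [← List.drop_drop, hd]; rfl) (fun c hc => hh c (by simp [hc]))]
    simp [pvChunkVal]
    ring

theorem pvBLoop (t : List Char) : ∀ (k : Nat) (n s : Int),
    (k : Int) + t.length = n → k % 2 = 0 → (∀ c ∈ t, c ∈ pvHexChars) →
    (PySem.List.enumerate t (k : Int)).foldl (pvDigitStep n) (some s)
      = some (s + pvChunkVal t) := by
  induction t using pvChunkVal.induct with
  | case1 =>
    intro k n s _ _ _
    simp [PySem.List.enumerate_nil, pvChunkVal]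
  | case2 c =>
    intro k n s hn hk hh
    have hcond : ¬ (PySem.Int.mod (k : Int) 2 = 0 ∧ (k : Int) + 1 < n) := by
      simp at hn
      intro ⟨_, h2⟩
      omega
    simp only [PySem.List.enumerate_cons, PySem.List.enumerate_nil, List.foldl_cons,
      List.foldl_nil, pvDigitStep, Option.bind_some, pvSingle_parse c (hh c (by simp)),
      Option.map_some, if_neg hcond, pvChunkVal]
    ring_nf
  | case3 c1 c2 r ih =>
    intro k n s hn hk hh
    simp only [List.length_cons] at hn
    push_cast at hn
    have hc1 : PySem.Int.mod (k : Int) 2 = 0 ∧ (k : Int) + 1 < n := by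
      constructor
      · rw [show ((2 : Int)) = ((2 : Nat) : Int) from rfl, PySem.Int.mod_natCast]
        exact_mod_cast hk
      · omega
    have hc2 : ¬ (PySem.Int.mod ((k : Int) + 1) 2 = 0 ∧ (k : Int) + 1 + 1 < n) := by
      intro ⟨h1, _⟩
      rw [show ((k : Int) + 1) = (((k + 1 : Nat)) : Int) from by norm_num,
        show ((2 : Int)) = ((2 : Nat) : Int) from rfl, PySem.Int.mod_natCast] at h1
      omega
    simp only [PySem.List.enumerate_cons, List.foldl_cons, pvDigitStep, Option.bind_some,
      pvSingle_parse c1 (hh c1 (by simp)), pvSingle_parse c2 (hh c2 (by simp)),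
      Option.map_some, if_pos hc1, if_neg hc2]
    rw [show ((k : Int) + 1 + 1) = (((k + 2 : Nat)) : Int) from by push_cast; ring,
      ih (k + 2) n _ (by push_cast; omega) (by omega)
        (fun c hc => hh c (by simp [hc]))]
    simp [pvChunkVal]
    ring

-- B's inner loop on a pure hex-digit string adds its byte sum
theorem pvCharSum_eq (l : List Char) (s : Int) (hh : ∀ c ∈ l, c ∈ pvHexChars) :
    pvCharSum l (some s) = some (s + pvChunkVal l) := by
  unfold pvCharSum
  simpa using pvBLoop l 0 (PySem.List.len l) s (by simp [PySem.List.len_eq]) (by omega) hh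

-- A's valeur loop (with its empty-string shortcut) adds valeur's byte sum
theorem pvSomme_eq (v : String) (base : Int) (hh : ∀ c ∈ v.toList, c ∈ pvHexChars) :
    (if v = "" then some base
     else (PySem.List.pyRange 0 v.toList.length 2).foldl (pvChunkAdd v.toList) (some base))
      = some (base + pvChunkVal v.toList) := by
  by_cases hv : v = ""
  · subst hv
    simp [pvChunkVal]
  · rw [if_neg hv, show ((0 : Int)) = (((0 : Nat)) : Int) from rfl,
      pvALoop v.toList v.toList 0 base (by simp) hh]

-- ===== VERDICT (by name: the statement is the Claim_ definition above) =====
theorem calcul_bcc_spec : Claim_equal_calcul_bcc := by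
  intro a f v _ hpre
  obtain ⟨ha, hlen, hf, hpa0, hpv0⟩ := hpre
  have hpa : ∀ c ∈ a.toList, c ∈ pvHexChars := by
    simp only [List.all_eq_true, List.contains_iff_mem] at hpa0; exact hpa0
  have hpv : ∀ c ∈ v.toList, c ∈ pvHexChars := by
    simp only [List.all_eq_true, List.contains_iff_mem] at hpv0; exact hpv0
  obtain ⟨xa, hxa⟩ := Option.isSome_iff_exists.mp ha
  obtain ⟨y, hy⟩ := Option.isSome_iff_exists.mp hf
  have hB : calcul_bcc_alt a f v
      = String.mk (pvLastTwo (pvFormat02x (y + pvChunkVal a.toList + pvChunkVal v.toList))) := by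
    simp only [calcul_bcc_alt, hxa, hy]
    rw [if_pos hlen]
    simp only [List.foldl_cons, List.foldl_nil]
    rw [pvCharSum_eq a.toList y hpa, pvCharSum_eq v.toList _ hpv]
  unfold Spec_calcul_bcc
  rw [hB]
  rcases hlen with h2 | h4
  · -- length 2
    obtain ⟨c1, c2, hl⟩ := List.length_eq_two.mp h2
    have hxa' : PySem.Int.ofCharsBase? a.toList 16 = some xa := by
      simpa [PySem.Int.ofStrBase?] using hxa
    rw [hl, pvPair_parse c1 (hpa c1 (by simp [hl])) c2 (hpa c2 (by simp [hl]))] at hxa'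
    have hx := Option.some.inj hxa'
    have hxv : pvChunkVal a.toList = xa := by
      rw [hl]; simp [pvChunkVal]; omega
    simp only [calcul_bcc, hxa, hy, h2]
    rw [if_pos trivial,
      pvSomme_eq v (xa + y) hpv,
      show xa + y + pvChunkVal v.toList
          = y + pvChunkVal a.toList + pvChunkVal v.toList from by rw [hxv]; ring,
      if_neg (by omega : ¬ (2 : Nat) = 4)]
  · -- length 4
    obtain ⟨c1, c2, c3, c4, hl⟩ := List.length_eq_four.mp h4
    have hs1 : PySem.List.slice a.toList (some 0) (some 2) = [c1, c2] := by
      rw [hl]; rfl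
    have hs2 : PySem.List.slice a.toList (some 2) (some 4) = [c3, c4] := by
      rw [hl]; rfl
    have hcv : pvChunkVal a.toList
        = 16 * pvHv c1 + pvHv c2 + (16 * pvHv c3 + pvHv c4) := by
      rw [hl]; simp [pvChunkVal]
    simp only [calcul_bcc, hxa, hy, h4, hs1, hs2,
      pvPair_parse c1 (hpa c1 (by simp [hl])) c2 (hpa c2 (by simp [hl])),
      pvPair_parse c3 (hpa c3 (by simp [hl])) c4 (hpa c4 (by simp [hl]))]
    rw [if_pos trivial,
      pvSomme_eq v _ hpv,
      show 16 * pvHv c1 + pvHv c2 + (16 * pvHv c3 + pvHv c4) + y + pvChunkVal v.toList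
          = y + pvChunkVal a.toList + pvChunkVal v.toList from by rw [hcv]; ring]
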